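-- pv_equiv track=rewrite | github.com/code4tots/googlecodejam-1 | 2014/1B/B/B.py | solve
-- ===== SOURCE A (Python) =====
-- def solve(A,B,K):
-- 	dk = K.bit_length()
-- 	def dfs(a,b,x):
-- 		if a >= A or b >= B or (a&b) >= K:
-- 			return 0
--
-- 		if x == 1:
-- 			return 1 if a&b < K else 0
--
-- 		if (a&b) + x <= K:
-- 			return min(x, B-b) * min(x, A-a)
--
-- 		x >>= 1
--
-- 		return sum(dfs(a+da,b+db,x) for da in (0,x) for db in (0,x))
--
-- 	return dfs(0,0,1 << 30)
-- ===== SOURCE B (Python) =====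
-- def solve(A, B, K):
--     # Counts pairs (a, b) with 0 <= a < min(A, 2**30), 0 <= b < min(B, 2**30)
--     # and a & b < K, by a digit DP over the 31 bit positions with
--     # tight/free flags for each of the three strict comparisons.
--     N = 1 << 30
--     X, Y, Kc = min(A, N), min(B, N), min(K, N)
--     if X <= 0 or Y <= 0 or Kc <= 0:
--         return 0
--     # state (fa, fb, fk): flag True = comparison already strictly satisfied,
--     # False = prefix still equal to the bound's prefix
--     cnt = {(False, False, False): 1}
--     for i in range(30, -1, -1):
--         xb, yb, kb = (X >> i) & 1, (Y >> i) & 1, (Kc >> i) & 1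
--         new = {}
--         for (fa, fb, fk), c in cnt.items():
--             for da in (0, 1):
--                 if not fa and da > xb:
--                     continue
--                 for db in (0, 1):
--                     if not fb and db > yb:
--                         continue
--                     ab = da & db
--                     if not fk and ab > kb:
--                         continue
--                     t = (fa or da < xb, fb or db < yb, fk or ab < kb)
--                     new[t] = new.get(t, 0) + c
--         cnt = new
--     return cnt.get((True, True, True), 0)
-- ===== Notes on version B (the rewrite author's own statement) =====
-- stated objective: alternative
-- what changed: A's quad-tree recursion over the value square (worst case ~3^30 nodes when A,B are large and K has few set high bits) is replaced by a digit DP over the 31 bit positions that carries pair counts for the 8 tight/free flag states of the three strict comparisons a<A, b<B, a&b<K, a fixed number of operations independent of the input values.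
import Mathlib
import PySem

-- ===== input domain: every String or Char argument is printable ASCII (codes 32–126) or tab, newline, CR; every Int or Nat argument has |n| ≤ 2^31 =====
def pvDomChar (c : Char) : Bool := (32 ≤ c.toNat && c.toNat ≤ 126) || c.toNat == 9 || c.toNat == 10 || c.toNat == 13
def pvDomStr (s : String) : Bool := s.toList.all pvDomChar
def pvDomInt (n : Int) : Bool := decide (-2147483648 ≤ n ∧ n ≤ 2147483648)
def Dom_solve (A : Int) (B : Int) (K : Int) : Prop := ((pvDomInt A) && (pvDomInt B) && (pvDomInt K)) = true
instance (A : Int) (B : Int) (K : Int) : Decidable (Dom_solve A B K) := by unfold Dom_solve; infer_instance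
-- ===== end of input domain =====

-- B replaces A's quad-tree recursion over the value square by a digit DP over the
-- 31 bit positions with tight/free flags for the three comparisons (alternative algorithm).

-- ===== PORT A =====
-- Python `x & y`, exact for nonnegative operands (the only ones that occur in either
-- port: a and b start at 0 and only grow; B's da, db are 0 or 1); shared by both ports.
def pyAnd (x y : Int) : Int := ((x.toNat &&& y.toNat : ℕ) : ℤ)

-- A's inner `dfs`; `fuel` only makes the recursion structural: `solve` starts it at 30,
-- and x = 2^fuel > 1 whenever the recursive branch is taken, so `fuel = 0` is never hit.
def dfsA (A B K : Int) : Nat → Int → Int → Int → Int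
  | fuel, a, b, x =>
    if a ≥ A ∨ b ≥ B ∨ pyAnd a b ≥ K then 0
    else if x = 1 then (if pyAnd a b < K then 1 else 0)
    else if pyAnd a b + x ≤ K then min x (B - b) * min x (A - a)
    else
      match fuel with
      | 0 => 0
      | fuel + 1 =>
        let x' := x >>> (1 : Nat)
        dfsA A B K fuel a b x' + dfsA A B K fuel a (b + x') x' +
          dfsA A B K fuel (a + x') b x' + dfsA A B K fuel (a + x') (b + x') x'

-- (the Python's unused `dk = K.bit_length()` is dropped)
def solve (A : Int) (B : Int) (K : Int) : Int :=
  dfsA A B K 30 0 0 ((1 : Int) <<< (30 : Nat))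

-- ===== PORT B =====
-- Python `(x >> i) & 1`, exact for the nonnegative x, i that occur here.
def pyBit (x i : Int) : Int := (((x.toNat >>> i.toNat) &&& 1 : ℕ) : ℤ)

-- one level of the digit DP: push every state count through the 4 bit choices
def stepB (X Y Kc : Int) (cnt : PySem.Dict (Bool × Bool × Bool) Int) (i : Int) :
    PySem.Dict (Bool × Bool × Bool) Int :=
  let xb := pyBit X i
  let yb := pyBit Y i
  let kb := pyBit Kc i
  cnt.items.foldl (fun new sc =>
    [(0 : Int), 1].foldl (fun new da =>
      if !sc.1.1 && decide (da > xb) then new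
      else [(0 : Int), 1].foldl (fun new db =>
        if !sc.1.2.1 && decide (db > yb) then new
        else
          let ab := pyAnd da db
          if !sc.1.2.2 && decide (ab > kb) then new
          else
            let t := (sc.1.1 || decide (da < xb), sc.1.2.1 || decide (db < yb),
                      sc.1.2.2 || decide (ab < kb))
            new.insert t (new.getD t 0 + sc.2)) new) new)
    PySem.Dict.empty

def solve_alt (A : Int) (B : Int) (K : Int) : Int :=
  let N : Int := (1 : Int) <<< (30 : Nat)
  let X := min A N
  let Y := min B N
  let Kc := min K N
  if X ≤ 0 ∨ Y ≤ 0 ∨ Kc ≤ 0 then 0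
  else
    ((PySem.List.pyRange 30 (-1) (-1)).foldl (stepB X Y Kc)
      (PySem.Dict.empty.insert (false, false, false) 1)).getD (true, true, true) 0

-- ===== PRECONDITION & SPEC =====
def Spec_solve (A : Int) (B : Int) (K : Int) (out : Int) : Prop := out = solve_alt A B K
instance (A : Int) (B : Int) (K : Int) (out : Int) : Decidable (Spec_solve A B K out) := by unfold Spec_solve; infer_instance

-- ===== CLAIM (what is proved, stated in full; the proofs are below) =====
def Claim_equal_solve : Prop := ∀ (A : Int) (B : Int) (K : Int), Dom_solve A B K → Spec_solve A B K (solve A B K)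

-- ===== LEMMAS AND PROOFS =====

-- The common mathematical yardstick: the number of pairs (p, q) in [0,x)² satisfying P.
def SC (x : ℕ) (P : ℕ → ℕ → Bool) : ℕ :=
  ∑ p ∈ Finset.range x, ∑ q ∈ Finset.range x, (if P p q then 1 else 0)

-- the predicate both programs count, centred at the origin
def predA (A B K : Int) (p q : ℕ) : Bool :=
  decide ((p : ℤ) < A) && decide ((q : ℤ) < B) && decide (((p &&& q : ℕ) : ℤ) < K)

theorem SC_congr {x : ℕ} {P Q : ℕ → ℕ → Bool}
    (h : ∀ p < x, ∀ q < x, P p q = Q p q) : SC x P = SC x Q := by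
  unfold SC
  refine Finset.sum_congr rfl fun p hp => Finset.sum_congr rfl fun q hq => ?_
  rw [h p (Finset.mem_range.1 hp) q (Finset.mem_range.1 hq)]

theorem SC_zero {x : ℕ} {P : ℕ → ℕ → Bool}
    (h : ∀ p < x, ∀ q < x, P p q = false) : SC x P = 0 := by
  unfold SC
  refine Finset.sum_eq_zero fun p hp => Finset.sum_eq_zero fun q hq => ?_
  rw [h p (Finset.mem_range.1 hp) q (Finset.mem_range.1 hq)]; rfl

theorem SC_split (x : ℕ) (P : ℕ → ℕ → Bool) :
    SC (x + x) P = SC x P + SC x (fun p q => P p (x + q)) +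
      SC x (fun p q => P (x + p) q) + SC x (fun p q => P (x + p) (x + q)) := by
  unfold SC
  rw [Finset.sum_range_add]
  rw [Finset.sum_congr rfl (fun p _ => Finset.sum_range_add (fun q => if P p q then 1 else 0) x x)]
  rw [Finset.sum_congr rfl (fun p _ => Finset.sum_range_add (fun q => if P (x + p) q then 1 else 0) x x)]
  rw [Finset.sum_add_distrib, Finset.sum_add_distrib]
  ring

theorem count_lt (x c : ℕ) :
    (∑ p ∈ Finset.range x, (if p < c then 1 else 0 : ℕ)) = min x c := by
  induction x with
  | zero => simp
  | succ n ih =>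
    rw [Finset.sum_range_succ, ih]
    by_cases h : n < c <;> simp [h] <;> omega

-- ---- bit-arithmetic toolbox ----

theorem and_mul_two_pow (i m n : ℕ) : (2 ^ i * m) &&& (2 ^ i * n) = 2 ^ i * (m &&& n) := by
  apply Nat.eq_of_testBit_eq
  intro j
  have h0 : (0 : ℕ) < 2 ^ i := Nat.two_pow_pos i
  have h1 := Nat.testBit_two_pow_mul_add m (b := 0) h0
  have h2 := Nat.testBit_two_pow_mul_add n (b := 0) h0
  have h3 := Nat.testBit_two_pow_mul_add (m &&& n) (b := 0) h0
  simp only [Nat.add_zero] at h1 h2 h3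
  rw [Nat.testBit_and, h1, h2, h3, Nat.testBit_and]
  by_cases hj : j < i <;> simp [hj]

theorem and_decomp {i p q : ℕ} (m n : ℕ) (hp : p < 2 ^ i) (hq : q < 2 ^ i) :
    (2 ^ i * m + p) &&& (2 ^ i * n + q) = 2 ^ i * (m &&& n) + (p &&& q) := by
  apply Nat.eq_of_testBit_eq
  intro j
  have hpq : p &&& q < 2 ^ i := lt_of_le_of_lt Nat.and_le_left hp
  rw [Nat.testBit_and, Nat.testBit_two_pow_mul_add m hp, Nat.testBit_two_pow_mul_add n hq,
    Nat.testBit_two_pow_mul_add (m &&& n) hpq, Nat.testBit_and, Nat.testBit_and]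
  by_cases hj : j < i <;> simp [hj]

theorem pyAnd_natCast (m n : ℕ) : pyAnd (m : ℤ) (n : ℤ) = ((m &&& n : ℕ) : ℤ) := by
  simp [pyAnd]

-- ---- A side: dfs computes the count over its square block ----

theorem SC_guard_zero (A B K : Int) {i a b : ℕ} (ha : 2 ^ i ∣ a) (hb : 2 ^ i ∣ b)
    (hg : A ≤ (a : ℤ) ∨ B ≤ (b : ℤ) ∨ K ≤ ((a &&& b : ℕ) : ℤ)) :
    SC (2 ^ i) (fun p q => predA A B K (a + p) (b + q)) = 0 := by
  apply SC_zero; intro p hp q hq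
  obtain ⟨m, hm⟩ := ha; obtain ⟨n, hn⟩ := hb
  have hde : (a + p) &&& (b + q) = 2 ^ i * (m &&& n) + (p &&& q) := by
    rw [hm, hn]; exact and_decomp m n hp hq
  have hab : a &&& b = 2 ^ i * (m &&& n) := by rw [hm, hn]; exact and_mul_two_pow i m n
  have hle : a &&& b ≤ (a + p) &&& (b + q) := by rw [hde, hab]; omega
  have hle' := (Nat.cast_le (α := ℤ)).2 hle
  have hc : ¬ (((((a + p : ℕ) : ℤ) < A) ∧ (((b + q : ℕ) : ℤ) < B)) ∧
      ((((a + p) &&& (b + q) : ℕ) : ℤ) < K)) := by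
    push_cast
    omega
  unfold predA
  rw [Bool.eq_false_iff]
  intro hT
  simp only [Bool.and_eq_true, decide_eq_true_eq] at hT
  exact hc hT

theorem SC_prod (A B K : Int) {i a b : ℕ} (ha : 2 ^ i ∣ a) (hb : 2 ^ i ∣ b)
    (hA : (a : ℤ) < A) (hB : (b : ℤ) < B)
    (hk : ((a &&& b : ℕ) : ℤ) + ((2 ^ i : ℕ) : ℤ) ≤ K) :
    ((SC (2 ^ i) (fun p q => predA A B K (a + p) (b + q)) : ℕ) : ℤ) =
      min ((2 ^ i : ℕ) : ℤ) (B - (b : ℤ)) * min ((2 ^ i : ℕ) : ℤ) (A - (a : ℤ)) := by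
  obtain ⟨m, hm⟩ := ha; obtain ⟨n, hn⟩ := hb
  have hstep : SC (2 ^ i) (fun p q => predA A B K (a + p) (b + q)) =
      SC (2 ^ i) (fun p q => decide (((a + p : ℕ) : ℤ) < A) && decide (((b + q : ℕ) : ℤ) < B)) := by
    apply SC_congr; intro p hp q hq
    have hde : (a + p) &&& (b + q) = 2 ^ i * (m &&& n) + (p &&& q) := by
      rw [hm, hn]; exact and_decomp m n hp hq
    have hab : a &&& b = 2 ^ i * (m &&& n) := by rw [hm, hn]; exact and_mul_two_pow i m n
    have hsmall : p &&& q < 2 ^ i := lt_of_le_of_lt Nat.and_le_left hp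
    have hlt : (a + p) &&& (b + q) < (a &&& b) + 2 ^ i := by rw [hde, hab]; omega
    have hlt' := (Nat.cast_lt (α := ℤ)).2 hlt
    have hK : (((a + p) &&& (b + q) : ℕ) : ℤ) < K := by push_cast at hlt' ⊢; omega
    unfold predA
    simp [hK]
  rw [hstep]
  have h1 : ∀ p : ℕ, (((a + p : ℕ) : ℤ) < A) ↔ p < (A - (a : ℤ)).toNat := by
    intro p; rw [Int.lt_toNat]; push_cast; omega
  have h2 : ∀ q : ℕ, (((b + q : ℕ) : ℤ) < B) ↔ q < (B - (b : ℤ)).toNat := by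
    intro q; rw [Int.lt_toNat]; push_cast; omega
  have hterm : ∀ p q : ℕ,
      (if (decide (((a + p : ℕ) : ℤ) < A) && decide (((b + q : ℕ) : ℤ) < B) : Bool) then (1 : ℕ) else 0) =
        (if p < (A - (a : ℤ)).toNat then 1 else 0) * (if q < (B - (b : ℤ)).toNat then 1 else 0) := by
    intro p q
    simp only [Bool.and_eq_true, decide_eq_true_eq, h1, h2]
    by_cases hp' : p < (A - (a : ℤ)).toNat <;> by_cases hq' : q < (B - (b : ℤ)).toNat
    · rw [if_pos hp', if_pos hq', if_pos ⟨hp', hq'⟩]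
    · rw [if_pos hp', if_neg hq', if_neg (by tauto)]
    · rw [if_neg hp', if_pos hq', if_neg (by tauto)]
    · rw [if_neg hp', if_neg hq', if_neg (by tauto)]
  have hSC : SC (2 ^ i) (fun p q => decide (((a + p : ℕ) : ℤ) < A) && decide (((b + q : ℕ) : ℤ) < B)) =
      min (2 ^ i) (A - (a : ℤ)).toNat * min (2 ^ i) (B - (b : ℤ)).toNat := by
    unfold SC
    rw [Finset.sum_congr rfl fun p _ => Finset.sum_congr rfl fun q _ => hterm p q]
    rw [← Finset.sum_mul_sum, count_lt, count_lt]
  rw [hSC]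
  have hA0 : (0 : ℤ) ≤ A - (a : ℤ) := by omega
  have hB0 : (0 : ℤ) ≤ B - (b : ℤ) := by omega
  rw [Nat.cast_mul, Nat.cast_min, Nat.cast_min, Int.toNat_of_nonneg hA0, Int.toNat_of_nonneg hB0]
  rw [mul_comm]

theorem dfsA_eq (A B K : Int) :
    ∀ (fuel : ℕ) (a b : ℕ), 2 ^ fuel ∣ a → 2 ^ fuel ∣ b →
      dfsA A B K fuel (a : ℤ) (b : ℤ) (((2 ^ fuel : ℕ) : ℤ)) =
        ((SC (2 ^ fuel) (fun p q => predA A B K (a + p) (b + q)) : ℕ) : ℤ) := by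
  intro fuel
  induction fuel with
  | zero =>
    intro a b ha hb
    rw [dfsA, pyAnd_natCast]
    by_cases hg : (a : ℤ) ≥ A ∨ (b : ℤ) ≥ B ∨ ((a &&& b : ℕ) : ℤ) ≥ K
    · rw [if_pos hg, SC_guard_zero A B K ha hb hg]; rfl
    · push_neg at hg
      obtain ⟨hA, hB, hK⟩ := hg
      rw [if_neg (by push_neg; exact ⟨hA, hB, hK⟩)]
      rw [if_pos (by norm_num)]
      have hSC : SC (2 ^ 0) (fun p q => predA A B K (a + p) (b + q)) =
          if ((a &&& b : ℕ) : ℤ) < K then 1 else 0 := by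
        unfold SC predA
        simp only [pow_zero, Finset.sum_range_one, Nat.add_zero]
        simp only [Bool.and_eq_true, decide_eq_true_eq]
        simp [hA, hB, hK]
      rw [hSC]
      split_ifs <;> simp
  | succ f ih =>
    intro a b ha hb
    have hf : (2 : ℕ) ^ f ∣ a := dvd_trans (pow_dvd_pow 2 (Nat.le_succ f)) ha
    have hg' : (2 : ℕ) ^ f ∣ b := dvd_trans (pow_dvd_pow 2 (Nat.le_succ f)) hb
    rw [dfsA, pyAnd_natCast]
    by_cases hg : (a : ℤ) ≥ A ∨ (b : ℤ) ≥ B ∨ ((a &&& b : ℕ) : ℤ) ≥ K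
    · rw [if_pos hg, SC_guard_zero A B K ha hb hg]; rfl
    · push_neg at hg
      obtain ⟨hA, hB, hK⟩ := hg
      rw [if_neg (by push_neg; exact ⟨hA, hB, hK⟩)]
      have hx1 : ¬ (((2 ^ (f + 1) : ℕ) : ℤ) = 1) := by
        have : (1 : ℕ) < 2 ^ (f + 1) := Nat.one_lt_two_pow (by omega)
        push_cast
        omega
      rw [if_neg hx1]
      by_cases hk : ((a &&& b : ℕ) : ℤ) + ((2 ^ (f + 1) : ℕ) : ℤ) ≤ K
      · rw [if_pos hk, SC_prod A B K ha hb hA hB hk]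
      · rw [if_neg hk]
        have hx' : ((2 ^ (f + 1) : ℕ) : ℤ) >>> (1 : Nat) = ((2 ^ f : ℕ) : ℤ) := by
          rw [← Int.natCast_shiftRight]
          congr 1
          rw [Nat.shiftRight_eq_div_pow, pow_one, pow_succ, Nat.mul_div_cancel _ (by norm_num)]
        simp only [hx']
        have c1 : ((b : ℕ) : ℤ) + ((2 ^ f : ℕ) : ℤ) = ((b + 2 ^ f : ℕ) : ℤ) := by push_cast; ring
        have c2 : ((a : ℕ) : ℤ) + ((2 ^ f : ℕ) : ℤ) = ((a + 2 ^ f : ℕ) : ℤ) := by push_cast; ring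
        rw [c1, c2]
        rw [ih a b hf hg', ih a (b + 2 ^ f) hf (dvd_add hg' dvd_rfl),
          ih (a + 2 ^ f) b (dvd_add hf dvd_rfl) hg',
          ih (a + 2 ^ f) (b + 2 ^ f) (dvd_add hf dvd_rfl) (dvd_add hg' dvd_rfl)]
        have h2 : (2 : ℕ) ^ (f + 1) = 2 ^ f + 2 ^ f := by ring
        rw [h2, SC_split]
        have e1 : SC (2 ^ f) (fun p q => predA A B K (a + p) (b + (2 ^ f + q))) =
            SC (2 ^ f) (fun p q => predA A B K (a + p) (b + 2 ^ f + q)) := by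
          apply SC_congr; intro p _ q _; rw [Nat.add_assoc]
        have e2 : SC (2 ^ f) (fun p q => predA A B K (a + (2 ^ f + p)) (b + q)) =
            SC (2 ^ f) (fun p q => predA A B K (a + 2 ^ f + p) (b + q)) := by
          apply SC_congr; intro p _ q _; rw [Nat.add_assoc]
        have e3 : SC (2 ^ f) (fun p q => predA A B K (a + (2 ^ f + p)) (b + (2 ^ f + q))) =
            SC (2 ^ f) (fun p q => predA A B K (a + 2 ^ f + p) (b + 2 ^ f + q)) := by
          apply SC_congr; intro p _ q _; rw [Nat.add_assoc, Nat.add_assoc]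
        rw [e1, e2, e3]
        push_cast
        ring

-- ---- B side: the digit DP ----

-- value of a DP state: completions over the i low bit positions
def gB (X Y K : ℕ) (i : ℕ) (s : Bool × Bool × Bool) : ℕ :=
  SC (2 ^ i) (fun p q =>
    (s.1 || decide (p < X % 2 ^ i)) && (s.2.1 || decide (q < Y % 2 ^ i)) &&
      (s.2.2 || decide (p &&& q < K % 2 ^ i)))

-- proof-side mirror of one transition of the DP
def tr (xb yb kb : ℕ) (s : Bool × Bool × Bool) (da db : ℕ) : Option (Bool × Bool × Bool) :=
  if !s.1 && decide (da > xb) then none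
  else if !s.2.1 && decide (db > yb) then none
  else if !s.2.2 && decide (da &&& db > kb) then none
  else some (s.1 || decide (da < xb), s.2.1 || decide (db < yb), s.2.2 || decide (da &&& db < kb))

def trVal (X Y K : ℕ) (i : ℕ) (xb yb kb : ℕ) (s : Bool × Bool × Bool) (da db : ℕ) : ℕ :=
  (tr xb yb kb s da db).elim 0 (gB X Y K i)

theorem gB_zero (X Y K : ℕ) (s : Bool × Bool × Bool) :
    gB X Y K 0 s = if s.1 && s.2.1 && s.2.2 then 1 else 0 := by
  obtain ⟨fa, fb, fk⟩ := s
  rcases fa <;> rcases fb <;> rcases fk <;> simp [gB, SC, Nat.mod_one]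

theorem axis_lt {i : ℕ} (f : Bool) {d xb : ℕ} (hd : d ≤ 1) (hxb : xb ≤ 1) {p r : ℕ}
    (hp : p < 2 ^ i) (hr : r < 2 ^ i) :
    (f || decide (2 ^ i * d + p < r + 2 ^ i * xb)) =
      (if (!f && decide (xb < d) : Bool) then false else ((f || decide (d < xb)) || decide (p < r))) := by
  rcases Nat.le_one_iff_eq_zero_or_eq_one.1 hd with rfl | rfl <;>
    rcases Nat.le_one_iff_eq_zero_or_eq_one.1 hxb with rfl | rfl <;>
      cases f <;> simp <;> omega

theorem quadrant (X Y K : ℕ) (i : ℕ) (s : Bool × Bool × Bool) {da db : ℕ}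
    (hda : da ≤ 1) (hdb : db ≤ 1) :
    SC (2 ^ i) (fun p q =>
      (s.1 || decide (2 ^ i * da + p < X % 2 ^ i + 2 ^ i * (X / 2 ^ i % 2))) &&
      (s.2.1 || decide (2 ^ i * db + q < Y % 2 ^ i + 2 ^ i * (Y / 2 ^ i % 2))) &&
      (s.2.2 || decide ((2 ^ i * da + p) &&& (2 ^ i * db + q) < K % 2 ^ i + 2 ^ i * (K / 2 ^ i % 2)))) =
    trVal X Y K i (X / 2 ^ i % 2) (Y / 2 ^ i % 2) (K / 2 ^ i % 2) s da db := by
  have hxb : X / 2 ^ i % 2 ≤ 1 := by omega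
  have hyb : Y / 2 ^ i % 2 ≤ 1 := by omega
  have hkb : K / 2 ^ i % 2 ≤ 1 := by omega
  have hab : da &&& db ≤ 1 := le_trans Nat.and_le_left hda
  have hXr : X % 2 ^ i < 2 ^ i := Nat.mod_lt _ (Nat.two_pow_pos i)
  have hYr : Y % 2 ^ i < 2 ^ i := Nat.mod_lt _ (Nat.two_pow_pos i)
  have hKr : K % 2 ^ i < 2 ^ i := Nat.mod_lt _ (Nat.two_pow_pos i)
  unfold trVal tr
  by_cases h1 : (!s.1 && decide (X / 2 ^ i % 2 < da) : Bool) = true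
  · rw [if_pos h1]
    apply SC_zero; intro p hp q hq
    rw [axis_lt s.1 hda hxb hp hXr, if_pos h1]
    simp
  · rw [if_neg h1]
    by_cases h2 : (!s.2.1 && decide (Y / 2 ^ i % 2 < db) : Bool) = true
    · rw [if_pos h2]
      apply SC_zero; intro p hp q hq
      rw [axis_lt s.2.1 hdb hyb hq hYr, if_pos h2]
      simp
    · rw [if_neg h2]
      by_cases h3 : (!s.2.2 && decide (K / 2 ^ i % 2 < da &&& db) : Bool) = true
      · rw [if_pos h3]
        apply SC_zero; intro p hp q hq
        have hpq : p &&& q < 2 ^ i := lt_of_le_of_lt Nat.and_le_left hp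
        rw [and_decomp da db hp hq, axis_lt s.2.2 hab hkb hpq hKr, if_pos h3]
        simp
      · rw [if_neg h3]
        apply SC_congr; intro p hp q hq
        have hpq : p &&& q < 2 ^ i := lt_of_le_of_lt Nat.and_le_left hp
        rw [axis_lt s.1 hda hxb hp hXr, if_neg h1,
          axis_lt s.2.1 hdb hyb hq hYr, if_neg h2,
          and_decomp da db hp hq, axis_lt s.2.2 hab hkb hpq hKr, if_neg h3]

theorem gB_succ (X Y K : ℕ) (i : ℕ) (s : Bool × Bool × Bool) :
    gB X Y K (i + 1) s =
      trVal X Y K i (X / 2 ^ i % 2) (Y / 2 ^ i % 2) (K / 2 ^ i % 2) s 0 0 +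
      trVal X Y K i (X / 2 ^ i % 2) (Y / 2 ^ i % 2) (K / 2 ^ i % 2) s 0 1 +
      trVal X Y K i (X / 2 ^ i % 2) (Y / 2 ^ i % 2) (K / 2 ^ i % 2) s 1 0 +
      trVal X Y K i (X / 2 ^ i % 2) (Y / 2 ^ i % 2) (K / 2 ^ i % 2) s 1 1 := by
  have h00 := quadrant X Y K i s (da := 0) (db := 0) (by omega) (by omega)
  have h01 := quadrant X Y K i s (da := 0) (db := 1) (by omega) (by omega)
  have h10 := quadrant X Y K i s (da := 1) (db := 0) (by omega) (by omega)
  have h11 := quadrant X Y K i s (da := 1) (db := 1) (by omega) (by omega)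
  simp only [Nat.mul_zero, Nat.mul_one, Nat.zero_add] at h00 h01 h10 h11
  unfold gB
  simp only [Nat.mod_pow_succ]
  rw [show (2 : ℕ) ^ (i + 1) = 2 ^ i + 2 ^ i by rw [pow_succ, Nat.mul_two]]
  rw [SC_split, h00, h01, h10, h11]

-- weight of a DP dict at level i
def WB (X Y K : ℕ) (i : ℕ) (d : PySem.Dict (Bool × Bool × Bool) Int) : ℤ :=
  ∑ s : Bool × Bool × Bool, d.getD s 0 * ((gB X Y K i s : ℕ) : ℤ)

set_option maxHeartbeats 1000000 in
theorem WB_insert (X Y K : ℕ) (i : ℕ) (d : PySem.Dict (Bool × Bool × Bool) Int)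
    (t : Bool × Bool × Bool) (v : ℤ) :
    WB X Y K i (d.insert t v) = WB X Y K i d + (v - d.getD t 0) * ((gB X Y K i t : ℕ) : ℤ) := by
  unfold WB
  have h : ∀ s, (d.insert t v).getD s 0 =
      (if s = t then v else d.getD s 0) := fun s =>
    PySem.Dict.getD_insert d t s v 0
  simp only [h]
  rw [Finset.sum_eq_sum_diff_singleton_add (Finset.mem_univ t)
      (f := fun s => (if s = t then v else d.getD s 0) * ((gB X Y K i s : ℕ) : ℤ)),
    Finset.sum_eq_sum_diff_singleton_add (Finset.mem_univ t)
      (f := fun s => d.getD s 0 * ((gB X Y K i s : ℕ) : ℤ))]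
  rw [Finset.sum_congr rfl (fun s hs => by
    rw [if_neg (by simpa using (Finset.mem_sdiff.1 hs).2)])]
  rw [if_pos rfl]
  ring

theorem pyBit_natCast (x i : ℕ) : pyBit (x : ℤ) (i : ℤ) = ((x / 2 ^ i % 2 : ℕ) : ℤ) := by
  unfold pyBit
  rw [Int.toNat_natCast, Int.toNat_natCast, Nat.shiftRight_eq_div_pow, Nat.and_one_is_mod]

-- value of a whole dict, as a sum over its item list
theorem WB_items (X Y K : ℕ) (i : ℕ) :
    ∀ (l : List ((Bool × Bool × Bool) × Int)),
      (PySem.Dict.mk l).keys.Nodup →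
      WB X Y K i (PySem.Dict.mk l) =
        (l.map (fun sc => sc.2 * ((gB X Y K i sc.1 : ℕ) : ℤ))).sum := by
  intro l
  induction l with
  | nil =>
    intro _
    unfold WB
    have h : ∀ s : Bool × Bool × Bool, (PySem.Dict.mk ([] : List ((Bool × Bool × Bool) × Int))).getD s 0 = 0 := by
      intro s
      rw [PySem.Dict.getD_eq_get?_getD]
      simp [PySem.Dict.get?]
    simp [h]
  | cons kv rest ih =>
    intro hnd
    obtain ⟨k, v⟩ := kv
    have hk : k ∉ (PySem.Dict.mk rest).keys := by
      have := hnd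
      simp only [PySem.Dict.keys, List.map_cons, List.nodup_cons] at this
      simpa [PySem.Dict.keys] using this.1
    have hrest : (PySem.Dict.mk rest).keys.Nodup := by
      have := hnd
      simp only [PySem.Dict.keys, List.map_cons, List.nodup_cons] at this
      simpa [PySem.Dict.keys] using this.2
    have hgetD : ∀ s, (PySem.Dict.mk ((k, v) :: rest)).getD s 0 =
        (if s = k then v else (PySem.Dict.mk rest).getD s 0) := by
      intro s
      rw [PySem.Dict.getD_eq_get?_getD, PySem.Dict.get?_mk_cons]
      by_cases hs : s = k
      · subst hs
        rw [if_pos (beq_self_eq_true s), if_pos rfl]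
        rfl
      · rw [if_neg (fun h => hs (beq_iff_eq.1 h).symm), if_neg hs, PySem.Dict.getD_eq_get?_getD]
    have hk0 : (PySem.Dict.mk rest).getD k 0 = 0 := by
      rw [PySem.Dict.getD_eq_get?_getD, (PySem.Dict.get?_eq_none_iff_not_mem_keys _ _).2 hk]
      rfl
    unfold WB
    simp only [hgetD]
    rw [Finset.sum_eq_sum_diff_singleton_add (Finset.mem_univ k)
      (f := fun s => (if s = k then v else (PySem.Dict.mk rest).getD s 0) * ((gB X Y K i s : ℕ) : ℤ))]
    rw [Finset.sum_congr rfl (fun s hs => by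
      rw [if_neg (by simpa using (Finset.mem_sdiff.1 hs).2)])]
    rw [if_pos rfl]
    have := ih hrest
    unfold WB at this
    rw [Finset.sum_eq_sum_diff_singleton_add (Finset.mem_univ k)
      (f := fun s => (PySem.Dict.mk rest).getD s 0 * ((gB X Y K i s : ℕ) : ℤ))] at this
    rw [hk0] at this
    simp only [List.map_cons, List.sum_cons]
    rw [← this]
    ring

-- one item of the level fold, pushed through the four bit choices
set_option maxHeartbeats 12000000 in
theorem item_W (X Y K : ℕ) (n : ℕ) (xb yb kb : ℕ) (hxb : xb ≤ 1) (hyb : yb ≤ 1) (hkb : kb ≤ 1)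
    (new : PySem.Dict (Bool × Bool × Bool) Int) (fa fb fk : Bool) (c : ℤ) :
    WB X Y K n ([(0 : Int), 1].foldl (fun new da =>
      if !fa && decide (da > ((xb : ℕ) : ℤ)) then new
      else [(0 : Int), 1].foldl (fun new db =>
        if !fb && decide (db > ((yb : ℕ) : ℤ)) then new
        else
          let ab := pyAnd da db
          if !fk && decide (ab > ((kb : ℕ) : ℤ)) then new
          else
            let t := (fa || decide (da < ((xb : ℕ) : ℤ)), fb || decide (db < ((yb : ℕ) : ℤ)),
                      fk || decide (ab < ((kb : ℕ) : ℤ)))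
            new.insert t (new.getD t 0 + c)) new) new) =
    WB X Y K n new +
      c * ((trVal X Y K n xb yb kb (fa, fb, fk) 0 0 + trVal X Y K n xb yb kb (fa, fb, fk) 0 1 +
        trVal X Y K n xb yb kb (fa, fb, fk) 1 0 + trVal X Y K n xb yb kb (fa, fb, fk) 1 1 : ℕ) : ℤ) := by
  rcases fa <;> rcases fb <;> rcases fk <;>
    interval_cases xb <;> interval_cases yb <;> interval_cases kb <;>
      simp [List.foldl, pyAnd, trVal, tr, WB_insert] <;> try (push_cast; ring)

theorem foldl_preserve {α β : Type} (P : α → Prop) (f : α → β → α)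
    (h : ∀ a b, P a → P (f a b)) : ∀ (l : List β) (a : α), P a → P (l.foldl f a) := by
  intro l
  induction l with
  | nil => intro a ha; exact ha
  | cons x xs ih => intro a ha; exact ih _ (h a x ha)

theorem nodup_keys_insert (d : PySem.Dict (Bool × Bool × Bool) Int) (k : Bool × Bool × Bool)
    (v : Int) (h : d.keys.Nodup) : (d.insert k v).keys.Nodup := by
  have := PySem.Dict.keys_foldl_insert [k] (fun _ _ => v) d
  simp only [List.foldl_cons, List.foldl_nil] at this
  rw [this]
  exact PySem.Set.nodup_update _ _ h

theorem stepB_nodup (X Y Kc : Int) (d : PySem.Dict (Bool × Bool × Bool) Int) (i : Int) :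
    (stepB X Y Kc d i).keys.Nodup := by
  unfold stepB
  apply foldl_preserve (P := fun d : PySem.Dict (Bool × Bool × Bool) Int => d.keys.Nodup)
  · intro a sc ha
    apply foldl_preserve (P := fun d : PySem.Dict (Bool × Bool × Bool) Int => d.keys.Nodup) _ _ _ _ ha
    intro a' da ha'
    dsimp only
    split_ifs with h1
    · exact ha'
    · apply foldl_preserve (P := fun d : PySem.Dict (Bool × Bool × Bool) Int => d.keys.Nodup) _ _ _ _ ha'
      intro a'' db ha''
      dsimp only
      split_ifs with h2 h3
      · exact ha''
      · exact ha''
      · exact nodup_keys_insert _ _ _ ha''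
  · simp [PySem.Dict.keys_empty]

theorem stepB_W (X Y K : ℕ) (n : ℕ) (d : PySem.Dict (Bool × Bool × Bool) Int)
    (hd : d.keys.Nodup) :
    WB X Y K n (stepB (X : ℤ) (Y : ℤ) (K : ℤ) d (n : ℤ)) = WB X Y K (n + 1) d := by
  have hxb : X / 2 ^ n % 2 ≤ 1 := by omega
  have hyb : Y / 2 ^ n % 2 ≤ 1 := by omega
  have hkb : K / 2 ^ n % 2 ≤ 1 := by omega
  unfold stepB
  simp only [pyBit_natCast]
  have hfold : ∀ (l : List ((Bool × Bool × Bool) × Int))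
      (acc : PySem.Dict (Bool × Bool × Bool) Int),
      WB X Y K n (l.foldl (fun new sc =>
        [(0 : Int), 1].foldl (fun new da =>
          if !sc.1.1 && decide (da > ((X / 2 ^ n % 2 : ℕ) : ℤ)) then new
          else [(0 : Int), 1].foldl (fun new db =>
            if !sc.1.2.1 && decide (db > ((Y / 2 ^ n % 2 : ℕ) : ℤ)) then new
            else
              let ab := pyAnd da db
              if !sc.1.2.2 && decide (ab > ((K / 2 ^ n % 2 : ℕ) : ℤ)) then new
              else
                let t := (sc.1.1 || decide (da < ((X / 2 ^ n % 2 : ℕ) : ℤ)),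
                          sc.1.2.1 || decide (db < ((Y / 2 ^ n % 2 : ℕ) : ℤ)),
                          sc.1.2.2 || decide (ab < ((K / 2 ^ n % 2 : ℕ) : ℤ)))
                new.insert t (new.getD t 0 + sc.2)) new) new) acc) =
      WB X Y K n acc + (l.map (fun sc => sc.2 * ((gB X Y K (n + 1) sc.1 : ℕ) : ℤ))).sum := by
    intro l
    induction l with
    | nil => intro acc; simp
    | cons sc rest ih =>
      intro acc
      obtain ⟨⟨fa, fb, fk⟩, c⟩ := sc
      rw [List.foldl_cons, ih, List.map_cons, List.sum_cons]
      rw [item_W X Y K n _ _ _ hxb hyb hkb acc fa fb fk c]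
      rw [gB_succ]
      ring
  rw [hfold]
  have hempty : WB X Y K n PySem.Dict.empty = 0 := by
    unfold WB
    simp [PySem.Dict.getD_empty]
  rw [hempty, zero_add]
  obtain ⟨l⟩ := d
  rw [WB_items X Y K (n + 1) l hd]

theorem fold_W (X Y K : ℕ) :
    ∀ (n : ℕ) (d : PySem.Dict (Bool × Bool × Bool) Int), d.keys.Nodup →
      WB X Y K 0 ((((List.range n).reverse.map (fun k => (k : ℤ)))).foldl
        (stepB (X : ℤ) (Y : ℤ) (K : ℤ)) d) = WB X Y K n d := by
  intro n
  induction n with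
  | zero => intro d _; simp
  | succ m ih =>
    intro d hd
    have hl : ((List.range (m + 1)).reverse.map (fun k => (k : ℤ))) =
        ((m : ℕ) : ℤ) :: ((List.range m).reverse.map (fun k => (k : ℤ))) := by
      rw [List.range_succ]; simp
    rw [hl, List.foldl_cons, ih _ (stepB_nodup _ _ _ _ _), stepB_W X Y K m d hd]

theorem solve_eq_SC (A B K : Int) :
    solve A B K = ((SC (2 ^ 30) (predA A B K) : ℕ) : ℤ) := by
  unfold solve
  have h0 : ((1 : Int) <<< (30 : Nat)) = ((2 ^ 30 : ℕ) : ℤ) := by decide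
  rw [h0]
  have h := dfsA_eq A B K 30 0 0 (dvd_zero _) (dvd_zero _)
  simp only [Nat.cast_zero] at h
  rw [h]
  exact congrArg (fun n : ℕ => (n : ℤ))
    (SC_congr fun p _ q _ => by rw [Nat.zero_add, Nat.zero_add])

theorem SC_zero_of_nonpos (A B K : Int) (h : A ≤ 0 ∨ B ≤ 0 ∨ K ≤ 0) :
    SC (2 ^ 30) (predA A B K) = 0 := by
  apply SC_zero
  intro p _ q _
  unfold predA
  rw [Bool.eq_false_iff]
  intro hT
  simp only [Bool.and_eq_true, decide_eq_true_eq] at hT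
  obtain ⟨⟨h1, h2⟩, h3⟩ := hT
  have c1 : (0 : ℤ) ≤ (p : ℤ) := Int.natCast_nonneg p
  have c2 : (0 : ℤ) ≤ (q : ℤ) := Int.natCast_nonneg q
  have c3 : (0 : ℤ) ≤ ((p &&& q : ℕ) : ℤ) := Int.natCast_nonneg _
  omega

theorem WB_zero_getD (X Y K : ℕ) (d : PySem.Dict (Bool × Bool × Bool) Int) :
    WB X Y K 0 d = d.getD (true, true, true) 0 := by
  unfold WB
  rw [Finset.sum_eq_single (true, true, true)]
  · rw [gB_zero]; simp
  · intro s _ hs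
    obtain ⟨a, b, c⟩ := s
    rw [gB_zero]
    rcases a <;> rcases b <;> rcases c <;> simp_all
  · intro h; exact absurd (Finset.mem_univ _) h

theorem WB_init (X Y K : ℕ) (i : ℕ) :
    WB X Y K i (PySem.Dict.empty.insert (false, false, false) 1) =
      ((gB X Y K i (false, false, false) : ℕ) : ℤ) := by
  unfold WB
  rw [Finset.sum_eq_single (false, false, false)]
  · rw [PySem.Dict.getD_insert, if_pos rfl, one_mul]
  · intro s _ hs
    rw [PySem.Dict.getD_insert, if_neg hs, PySem.Dict.getD_empty, zero_mul]
  · intro h; exact absurd (Finset.mem_univ _) h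

theorem gB_top (Xn Yn Kn : ℕ) (hX : Xn ≤ 2 ^ 30) (hY : Yn ≤ 2 ^ 30) (hK : Kn ≤ 2 ^ 30)
    (A B K : Int)
    (hXA : ∀ p : ℕ, p < 2 ^ 30 → (p < Xn ↔ (p : ℤ) < A))
    (hYB : ∀ q : ℕ, q < 2 ^ 30 → (q < Yn ↔ (q : ℤ) < B))
    (hKK : ∀ v : ℕ, v < 2 ^ 30 → (v < Kn ↔ (v : ℤ) < K)) :
    gB Xn Yn Kn 31 (false, false, false) = SC (2 ^ 30) (predA A B K) := by
  have h31 : (2 : ℕ) ^ 30 < 2 ^ 31 := by norm_num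
  unfold gB
  simp only [Nat.mod_eq_of_lt (lt_of_le_of_lt hX h31), Nat.mod_eq_of_lt (lt_of_le_of_lt hY h31),
    Nat.mod_eq_of_lt (lt_of_le_of_lt hK h31), Bool.false_or]
  rw [show (2 : ℕ) ^ 31 = 2 ^ 30 + 2 ^ 30 by norm_num, SC_split]
  have z1 : SC (2 ^ 30) (fun p q => decide (p < Xn) && decide (2 ^ 30 + q < Yn) &&
      decide (p &&& (2 ^ 30 + q) < Kn)) = 0 := by
    apply SC_zero; intro p _ q _
    rw [Bool.eq_false_iff]; intro hT
    simp only [Bool.and_eq_true, decide_eq_true_eq] at hT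
    omega
  have z2 : SC (2 ^ 30) (fun p q => decide (2 ^ 30 + p < Xn) && decide (q < Yn) &&
      decide ((2 ^ 30 + p) &&& q < Kn)) = 0 := by
    apply SC_zero; intro p _ q _
    rw [Bool.eq_false_iff]; intro hT
    simp only [Bool.and_eq_true, decide_eq_true_eq] at hT
    omega
  have z3 : SC (2 ^ 30) (fun p q => decide (2 ^ 30 + p < Xn) && decide (2 ^ 30 + q < Yn) &&
      decide ((2 ^ 30 + p) &&& (2 ^ 30 + q) < Kn)) = 0 := by
    apply SC_zero; intro p _ q _
    rw [Bool.eq_false_iff]; intro hT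
    simp only [Bool.and_eq_true, decide_eq_true_eq] at hT
    omega
  rw [z1, z2, z3]
  have hmain : SC (2 ^ 30) (fun p q => decide (p < Xn) && decide (q < Yn) &&
      decide (p &&& q < Kn)) = SC (2 ^ 30) (predA A B K) := by
    apply SC_congr; intro p hp q hq
    unfold predA
    have hpq : p &&& q < 2 ^ 30 := lt_of_le_of_lt Nat.and_le_left hp
    rw [decide_eq_decide.2 (hXA p hp), decide_eq_decide.2 (hYB q hq),
      decide_eq_decide.2 (hKK _ hpq)]
  rw [hmain]
  omega

-- ===== VERDICT (by name: the statement is the Claim_ definition above) =====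
set_option maxRecDepth 8000 in
theorem solve_spec : Claim_equal_solve := by
  intro A B K _
  unfold Spec_solve
  rw [solve_eq_SC]
  have hN : (0 : ℤ) < (1 : ℤ) <<< (30 : Nat) := by decide
  by_cases hg : (min A ((1 : ℤ) <<< (30 : Nat)) ≤ 0 ∨ min B ((1 : ℤ) <<< (30 : Nat)) ≤ 0 ∨
      min K ((1 : ℤ) <<< (30 : Nat)) ≤ 0)
  · have h0 : SC (2 ^ 30) (predA A B K) = 0 := by
      apply SC_zero_of_nonpos
      rcases hg with h | h | h
      · left; have := min_le_iff.1 h; omega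
      · right; left; have := min_le_iff.1 h; omega
      · right; right; have := min_le_iff.1 h; omega
    rw [h0]
    simp only [solve_alt]
    rw [if_pos hg]
    simp
  · push_neg at hg
    obtain ⟨hA, hB, hK⟩ := hg
    have hXcast : min A ((1 : ℤ) <<< (30 : Nat)) = ((min A ((1 : ℤ) <<< (30 : Nat))).toNat : ℤ) :=
      (Int.toNat_of_nonneg (le_of_lt hA)).symm
    have hYcast : min B ((1 : ℤ) <<< (30 : Nat)) = ((min B ((1 : ℤ) <<< (30 : Nat))).toNat : ℤ) :=
      (Int.toNat_of_nonneg (le_of_lt hB)).symm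
    have hKcast : min K ((1 : ℤ) <<< (30 : Nat)) = ((min K ((1 : ℤ) <<< (30 : Nat))).toNat : ℤ) :=
      (Int.toNat_of_nonneg (le_of_lt hK)).symm
    have hBoundX : (min A ((1 : ℤ) <<< (30 : Nat))).toNat ≤ 2 ^ 30 := by
      have h1 : min A ((1 : ℤ) <<< (30 : Nat)) ≤ (1 : ℤ) <<< (30 : Nat) := min_le_right _ _
      have h2 : ((1 : ℤ) <<< (30 : Nat)).toNat = 2 ^ 30 := by decide
      omega
    have hBoundY : (min B ((1 : ℤ) <<< (30 : Nat))).toNat ≤ 2 ^ 30 := by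
      have h1 : min B ((1 : ℤ) <<< (30 : Nat)) ≤ (1 : ℤ) <<< (30 : Nat) := min_le_right _ _
      have h2 : ((1 : ℤ) <<< (30 : Nat)).toNat = 2 ^ 30 := by decide
      omega
    have hBoundK : (min K ((1 : ℤ) <<< (30 : Nat))).toNat ≤ 2 ^ 30 := by
      have h1 : min K ((1 : ℤ) <<< (30 : Nat)) ≤ (1 : ℤ) <<< (30 : Nat) := min_le_right _ _
      have h2 : ((1 : ℤ) <<< (30 : Nat)).toNat = 2 ^ 30 := by decide
      omega
    have hiff : ∀ (Z : ℤ) (v : ℕ), v < 2 ^ 30 →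
        (v < (min Z ((1 : ℤ) <<< (30 : Nat))).toNat ↔ (v : ℤ) < Z) := by
      intro Z v hv
      rw [Int.lt_toNat, lt_min_iff]
      have hvN : (v : ℤ) < (1 : ℤ) <<< (30 : Nat) := by
        have : ((2 ^ 30 : ℕ) : ℤ) = (1 : ℤ) <<< (30 : Nat) := by decide
        have := (Nat.cast_lt (α := ℤ)).2 hv
        omega
      constructor
      · intro h; exact h.1
      · intro h; exact ⟨h, hvN⟩
    simp only [solve_alt]
    rw [if_neg (by push_neg; exact ⟨hA, hB, hK⟩)]
    rw [hXcast, hYcast, hKcast]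
    rw [show PySem.List.pyRange 30 (-1) (-1) = ((List.range 31).reverse.map (fun k => (k : ℤ)))
      from by decide]
    rw [← WB_zero_getD ((min A ((1 : ℤ) <<< (30 : Nat))).toNat)
        ((min B ((1 : ℤ) <<< (30 : Nat))).toNat) ((min K ((1 : ℤ) <<< (30 : Nat))).toNat)]
    rw [fold_W _ _ _ 31 _ (nodup_keys_insert _ _ _ (by simp [PySem.Dict.keys_empty]))]
    rw [WB_init]
    rw [gB_top _ _ _ hBoundX hBoundY hBoundK A B K (hiff A) (hiff B) (hiff K)]
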